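-- pv_equiv track=rewrite | github.com/Yukun-Huang/Google-KickStart | 2019 Round A/A_py/A_small.py | solution
-- ===== SOURCE A (Python) =====
-- def calc_min_k(chooce):
--     min_k = 0
--     max_S = max(chooce)
--     for Si in chooce:
--         min_k += (max_S - Si)
--     return min_k
--
-- def solution(N, P, S):
--     min_k_list = []
--     S = sorted(S)
--     for p_left in range(N - P + 1):
--         chooce = S[p_left:p_left+P]
--         min_k_list.append(calc_min_k(chooce))
--     answer = min(min_k_list)
--     return answer
-- ===== SOURCE B (Python) =====
-- def solution(N, P, S):
--     # Sort once, use prefix sums; each window's max is its last element, so each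
--     # window cost is O(1) and the minimum is kept as a running value.
--     T = sorted(S)
--     n = len(T)
--     pre = [0]
--     for x in T:
--         pre.append(pre[-1] + x)
--     best = None
--     for l in range(N - P + 1):
--         r = min(l + P, n)
--         cost = T[r - 1] * (r - l) - (pre[r] - pre[l])
--         if best is None or cost < best:
--             best = cost
--     return best
-- ===== Notes on version B (the rewrite author's own statement) =====
-- stated objective: faster
-- what changed: Replaces the per-window rescan (max + sum over each length-P slice, collected into a list that is then min'ed) by prefix sums over the sorted list with the window max read off as its last element, keeping a running minimum.
-- outside the precondition, e.g. on solution(-1, -1, [3, 0, -3]): A returns 3, B returns 0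
import Mathlib
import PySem

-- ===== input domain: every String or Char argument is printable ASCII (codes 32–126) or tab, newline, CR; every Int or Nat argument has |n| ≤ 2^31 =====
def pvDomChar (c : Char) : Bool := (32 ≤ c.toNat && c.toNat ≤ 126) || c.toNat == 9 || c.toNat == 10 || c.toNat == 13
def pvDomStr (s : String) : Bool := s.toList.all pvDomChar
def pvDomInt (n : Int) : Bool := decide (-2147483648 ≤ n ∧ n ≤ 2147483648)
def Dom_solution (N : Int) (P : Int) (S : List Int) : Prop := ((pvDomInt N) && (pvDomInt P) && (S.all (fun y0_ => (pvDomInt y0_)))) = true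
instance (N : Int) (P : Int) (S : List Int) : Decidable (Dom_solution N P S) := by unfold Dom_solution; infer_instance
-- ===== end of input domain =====

-- B replaces A's per-window rescan by prefix sums on the sorted list (window max = its
-- last element) with a running minimum: asymptotically fewer operations, same values.

-- ===== PORT A =====
def calcMinK (chooce : List Int) : Int :=
  match PySem.List.max? chooce (fun x => x) with
  | none => 0  -- Python's max([]) raises ValueError; such inputs are excluded by Pre_
  | some maxS => chooce.foldl (fun minK si => minK + (maxS - si)) 0

def solution (N : Int) (P : Int) (S : List Int) : Int :=
  let T := PySem.List.sorted S (fun x => x) false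
  let minKList := (PySem.List.pyRange 0 (N - P + 1) 1).foldl
      (fun acc pLeft =>
        acc ++ [calcMinK (PySem.List.slice T (some pLeft) (some (pLeft + P)))]) []
  match PySem.List.min? minKList (fun x => x) with
  | none => 0  -- Python's min([]) raises ValueError; such inputs are excluded by Pre_
  | some answer => answer

-- ===== PORT B =====
-- pre = [0]; for x in T: pre.append(pre[-1] + x)
def buildPre (T : List Int) : List Int :=
  T.foldl (fun pre x => pre ++ [PySem.List.pyGetD pre (-1) 0 + x]) [0]

-- r = min(l+P, n); cost = T[r-1]*(r-l) - (pre[r]-pre[l])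
def windowCost (T pre : List Int) (n P l : Int) : Int :=
  let r := min (l + P) n
  PySem.List.pyGetD T (r - 1) 0 * (r - l)
    - (PySem.List.pyGetD pre r 0 - PySem.List.pyGetD pre l 0)

def solution_alt (N : Int) (P : Int) (S : List Int) : Int :=
  let T := PySem.List.sorted S (fun x => x) false
  let n : Int := T.length
  let pre := buildPre T
  let best := (PySem.List.pyRange 0 (N - P + 1) 1).foldl
      (fun best l =>
        let cost := windowCost T pre n P l
        match best with
        | none => some cost
        | some b => if cost < b then some cost else some b) none
  match best with
  | none => 0  -- Python B returns None here (range empty); excluded by Pre_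
  | some a => a

-- ===== PRECONDITION & SPEC =====
-- Pre_ is exactly where A returns normally with a positive window width P: A raises
-- ValueError when P > N (min of an empty list) or when some window is empty (max of an
-- empty slice, i.e. N - P ≥ len(S)); nonpositive P (a negative window width, reached
-- only through Python's negative-slice-end wraparound) is outside the problem's
-- natural domain and is excluded too.
def Pre_solution (N : Int) (P : Int) (S : List Int) : Prop :=
  1 ≤ P ∧ P ≤ N ∧ N - P < (S.length : Int)
instance (N : Int) (P : Int) (S : List Int) : Decidable (Pre_solution N P S) := by
  unfold Pre_solution; infer_instance

def pvWitness_solution : Int × Int × List Int := (3, 2, [3, 1, 2])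

def Spec_solution (N : Int) (P : Int) (S : List Int) (out : Int) : Prop :=
  out = solution_alt N P S
instance (N : Int) (P : Int) (S : List Int) (out : Int) : Decidable (Spec_solution N P S out) := by
  unfold Spec_solution; infer_instance

-- ===== CLAIM (what is proved, stated in full; the proofs are below) =====
def Claim_equal_solution : Prop :=
  ∀ (N : Int) (P : Int) (S : List Int),
    Dom_solution N P S → Pre_solution N P S → Spec_solution N P S (solution N P S)


-- running sum(maxS - si) loop = m*len - sum
theorem foldl_cost (c : List Int) (m init : Int) :
    c.foldl (fun minK si => minK + (m - si)) init = init + m * c.length - c.sum := by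
  induction c generalizing init with
  | nil => simp
  | cons x t ih => simp only [List.foldl, ih, List.length_cons, List.sum_cons]; push_cast; ring

-- closed form of the prefix-sum list B builds
def preList (s : Int) : List Int → List Int
  | [] => []
  | x :: t => (s + x) :: preList (s + x) t

theorem preList_length (s : Int) (T : List Int) : (preList s T).length = T.length := by
  induction T generalizing s with
  | nil => rfl
  | cons x t ih => simp [preList, ih]

theorem buildPre_go (T : List Int) (acc : List Int) (s : Int) (hne : acc ≠ [])
    (hs : acc.getLast hne = s) :
    T.foldl (fun pre x => pre ++ [PySem.List.pyGetD pre (-1) 0 + x]) acc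
      = acc ++ preList s T := by
  induction T generalizing acc s with
  | nil => simp [preList]
  | cons x t ih =>
    simp only [List.foldl, preList]
    rw [PySem.List.pyGetD_neg_one (h := hne), hs,
        ih (acc ++ [s + x]) (s + x) (by simp) (by simp)]
    simp

theorem buildPre_eq (T : List Int) : buildPre T = 0 :: preList 0 T := by
  rw [buildPre, buildPre_go T [0] 0 (by simp) (by simp)]
  rfl

theorem preList_get (T : List Int) (s : Int) (i : Nat) (hi : i ≤ T.length) :
    (s :: preList s T)[i]? = some (s + (T.take i).sum) := by
  induction T generalizing s i with
  | nil =>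
    have : i = 0 := by simpa using hi
    subst this; simp
  | cons x t ih =>
    cases i with
    | zero => simp
    | succ j =>
      have hj : j ≤ t.length := by simpa using hi
      simp only [preList, List.getElem?_cons_succ]
      rw [ih (s + x) j hj]
      simp [add_assoc]

theorem buildPre_getD (T : List Int) (i : Int) (h0 : 0 ≤ i) (h1 : i ≤ (T.length : Int)) :
    PySem.List.pyGetD (buildPre T) i 0 = (T.take i.toNat).sum := by
  have hlen : (buildPre T).length = T.length + 1 := by
    simp [buildPre_eq, preList_length]
  rw [PySem.List.pyGetD_eq_getElem (buildPre T) 0 h0 (by rw [hlen]; push_cast; omega)]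
  have h2 := preList_get T 0 i.toNat (by omega)
  rw [← buildPre_eq] at h2
  rw [List.getElem?_eq_getElem (by omega)] at h2
  simpa using h2

theorem optmin_some (g : Int → Int) (t : List Int) (b : Int) :
    t.foldl (fun best l => match best with
        | none => some (g l)
        | some b => if g l < b then some (g l) else some b) (some b)
      = some (t.foldl (fun acc l => min acc (g l)) b) := by
  induction t generalizing b with
  | nil => rfl
  | cons x t ih =>
    simp only [List.foldl]
    have h : (if g x < b then some (g x) else some b) = some (min b (g x)) := by
      split_ifs with h <;> simp [min_def] <;> omega
    rw [h, ih]

theorem min_match_eq (g h : Int → Int) (xs : List Int) (hne : xs ≠ [])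
    (hgh : ∀ l ∈ xs, h l = g l) :
    (match PySem.List.min? (xs.map h) (fun x => x) with
     | none => (0 : Int) | some a => a)
  = (match xs.foldl (fun best l => match best with
        | none => some (g l)
        | some b => if g l < b then some (g l) else some b) none with
     | none => (0 : Int) | some a => a) := by
  have hmap : xs.map h = xs.map g := List.map_congr_left hgh
  cases xs with
  | nil => exact absurd rfl hne
  | cons x t =>
    rw [hmap]
    simp only [List.map_cons, PySem.List.min?_id_cons, List.foldl]
    rw [optmin_some, List.foldl_map]

theorem window_eq (T : List Int) (hpair : T.Pairwise (· ≤ ·)) (P l : Int)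
    (hP : 1 ≤ P) (h0 : 0 ≤ l) (hl : l < (T.length : Int)) :
    calcMinK (PySem.List.slice T (some l) (some (l + P)))
      = windowCost T (buildPre T) (T.length : Int) P l := by
  set n := T.length with hn
  set a := l.toNat with ha
  have hal : (a : Int) = l := Int.toNat_of_nonneg h0
  have han : a < n := by omega
  set pt := P.toNat with hpt
  have hptl : (pt : Int) = P := Int.toNat_of_nonneg (by omega)
  have hpt1 : 1 ≤ pt := by omega
  set W := PySem.List.slice T (some l) (some (l + P)) with hWdef
  have hslice : W = (T.drop a).take pt := by
    rw [hWdef, PySem.List.slice_toNat T h0 (by omega)]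
    congr 1
    omega
  set rt := min (a + pt) n with hrt
  have hWlen : W.length = rt - a := by
    rw [hslice]; simp; omega
  have hrt1 : a + 1 ≤ rt := by omega
  have hWget : ∀ (k : Nat) (hk : k < W.length), W[k] = T[a + k]'(by omega) := by
    intro k hk
    have hk' : k < W.length := hk
    rw [hWlen] at hk'
    simp only [hslice]
    rw [List.getElem_take, List.getElem_drop]
  -- W.take rt decomposition: take rt T = take a T ++ W
  have hsplit : T.take rt = T.take a ++ W := by
    have h1 : (T.drop a).take pt = (T.drop a).take (rt - a) := by
      rcases Nat.le_total (a + pt) n with hc | hc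
      · have : rt = a + pt := by omega
        rw [this]; congr 1; omega
      · have h2 : rt = n := by omega
        rw [List.take_of_length_le (by simp; omega), List.take_of_length_le (by simp; omega)]
    have h2 : rt = a + (rt - a) := by omega
    rw [hslice, h1, h2, List.take_add]
    simp
  have hsum : W.sum = (T.take rt).sum - (T.take a).sum := by
    rw [hsplit, List.sum_append]; ring
  -- the window is nonempty, so max? returns some m, and m = T[rt-1]
  have hWne : W ≠ [] := by
    intro hcon
    have := hWlen
    rw [hcon] at this
    simp at this
    omega
  obtain ⟨m, hm⟩ : ∃ m, PySem.List.max? W (fun x => x) = some m := by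
    cases hmx : PySem.List.max? W (fun x => x) with
    | none => exact absurd ((PySem.List.max?_eq_none_iff W _).mp hmx) hWne
    | some m => exact ⟨m, rfl⟩
  have hrtn : rt - 1 < n := by omega
  have hmono : ∀ (i j : Nat) (hi : i < n) (hj : j < n), i ≤ j → T[i] ≤ T[j] := by
    intro i j hi hj hij
    rcases Nat.lt_or_ge i j with hlt | hge
    · exact (List.pairwise_iff_getElem.mp hpair) i j hi hj hlt
    · have : i = j := by omega
      subst this; exact le_refl _
  have hmval : m = T[rt - 1]'hrtn := by
    have hmem := PySem.List.max?_mem hm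
    obtain ⟨k, hk, hkm⟩ := List.mem_iff_getElem.mp hmem
    have h1 : m ≤ T[rt - 1]'hrtn := by
      rw [← hkm, hWget k hk]
      exact hmono (a + k) (rt - 1) (by omega) hrtn (by rw [hWlen] at hk; omega)
    have h2 : T[rt - 1]'hrtn ≤ m := by
      have hin : T[rt - 1]'hrtn ∈ W := by
        have hlt : rt - a - 1 < W.length := by omega
        have := hWget (rt - a - 1) hlt
        rw [List.mem_iff_getElem]
        refine ⟨rt - a - 1, hlt, ?_⟩
        rw [this]
        congr 1
        omega
      exact PySem.List.max?_isMax hm _ hin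
    omega
  -- evaluate both sides
  have hAn : calcMinK W = m * W.length - W.sum := by
    rw [calcMinK, hm]
    simp only []
    rw [foldl_cost]; ring
  have hr : min (l + P) (n : Int) = (rt : Int) := by omega
  rw [hAn, windowCost]
  simp only [hr]
  rw [PySem.List.pyGetD_eq_getElem T 0 (by omega) (by omega),
      buildPre_getD T ((rt : Int)) (by omega) (by omega),
      buildPre_getD T l h0 (by omega)]
  have hcast1 : ((rt : Int)).toNat = rt := by omega
  have hcast2 : ((rt : Int) - 1).toNat = rt - 1 := by omega
  have hcast3 : l.toNat = a := rfl
  rw [hcast1, hcast3]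
  have hgetc : T[((rt : Int) - 1).toNat]'(by omega) = T[rt - 1]'hrtn := by
    congr 1
  rw [hgetc, hmval, hsum, hWlen]
  have h9 : ((rt : Int) - l) = ((rt - a : Nat) : Int) := by omega
  rw [h9]

-- ===== VERDICT (by name: the statement is the Claim_ definition above) =====
theorem solution_spec : Claim_equal_solution := by
  intro N P S _ hpre
  obtain ⟨hP1, hPN, hNP⟩ := hpre
  unfold Spec_solution solution solution_alt
  dsimp only
  set T := PySem.List.sorted S (fun x => x) false with hT
  have hlen : T.length = S.length := PySem.List.length_sorted S _ false
  have hpair : T.Pairwise (· ≤ ·) := PySem.List.sorted_pairwise S (fun x => x)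
  have hbne : (0 : Int) < N - P + 1 := by omega
  rw [PySem.List.foldl_append_singleton_eq_map
        (fun pLeft => calcMinK (PySem.List.slice T (some pLeft) (some (pLeft + P))))]
  rw [List.nil_append]
  exact min_match_eq (fun l => windowCost T (buildPre T) (T.length : Int) P l)
    (fun l => calcMinK (PySem.List.slice T (some l) (some (l + P))))
    (PySem.List.pyRange 0 (N - P + 1) 1)
    (by simp [PySem.List.pyRange_one_cons hbne])
    (by
      intro l hl
      obtain ⟨hl0, hl1⟩ := PySem.List.mem_pyRange_one.mp hl
      exact window_eq T hpair P l hP1 hl0 (by omega))
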